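-- pv_equiv track=rewrite | github.com/Kuhron/programming | Language/ProtoDaellic.py | parse_word_str_to_list
-- ===== SOURCE A (Python) =====
-- def parse_word_str_to_list(w):
--     lst = []
--     inside_brackets = False
--     current_item = ""
--     for c in w:
--         if inside_brackets:
--             assert c != "["
--             # no nesting allowed, no meta-digraphs
--             if c == "]":
--                 current_item += c
--                 lst.append(current_item)
--                 current_item = ""
--                 inside_brackets = False
--             else:
--                 current_item += c
--         else:
--             if c == "[":
--                 assert current_item == ""
--                 current_item += c
--                 inside_brackets = True
--             elif c == "_":
--                 # use this to make blanks in rules with string notation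
--                 lst.append("")
--             else:
--                 lst.append(c)
--     return lst
-- ===== SOURCE B (Python) =====
-- def parse_word_str_to_list(w):
--     # index-based scan: on '[', locate the closing ']' with str.find and
--     # slice the whole bracket group out in one step.
--     lst = []
--     i, n = 0, len(w)
--     while i < n:
--         c = w[i]
--         if c == "[":
--             j = w.find("]", i + 1)
--             if j == -1:
--                 break
--             lst.append(w[i:j + 1])
--             i = j + 1
--         else:
--             lst.append("" if c == "_" else c)
--             i += 1
--     return lst
-- ===== Notes on version B (the rewrite author's own statement) =====
-- stated objective: alternative
-- what changed: Replaced A's per-character state machine (inside_brackets flag + current_item accumulator) with an index-based scan that, on '[', locates the closing ']' with str.find and slices the whole bracket group out in one step.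
import Mathlib
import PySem

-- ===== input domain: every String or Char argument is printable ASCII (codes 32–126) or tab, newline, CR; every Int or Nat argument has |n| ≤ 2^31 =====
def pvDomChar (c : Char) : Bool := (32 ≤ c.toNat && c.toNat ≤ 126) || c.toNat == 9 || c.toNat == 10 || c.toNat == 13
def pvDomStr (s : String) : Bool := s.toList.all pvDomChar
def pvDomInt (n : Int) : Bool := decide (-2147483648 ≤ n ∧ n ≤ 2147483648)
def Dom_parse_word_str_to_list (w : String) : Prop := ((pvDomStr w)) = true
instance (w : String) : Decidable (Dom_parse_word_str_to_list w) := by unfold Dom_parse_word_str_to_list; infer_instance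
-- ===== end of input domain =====

-- B rewrites A's per-character state machine as an index-based scan that slices out a whole
-- bracket group at once via find (objective: alternative decomposition).

-- ===== PORT A =====
-- fold state = (lst, inside_brackets, current_item); the assert only fires on inputs
-- excluded by Pre_ (Python raises AssertionError there), so it is not represented.
def pwA_step (st : List (List Char) × Bool × List Char) (c : Char) :
    List (List Char) × Bool × List Char :=
  match st with
  | (lst, inside, cur) =>
    if inside then
      if c = ']' then (lst ++ [cur ++ [c]], false, [])
      else (lst, true, cur ++ [c])
    else
      if c = '[' then (lst, true, cur ++ [c])
      else if c = '_' then (lst ++ [([] : List Char)], false, [])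
      else (lst ++ [[c]], false, [])

def parse_word_str_to_list (w : String) : List String :=
  ((w.toList.foldl pwA_step ([], false, [])).1).map String.ofList

-- ===== PORT B =====
-- Source B's while loop over index i; fuel is a pure totality guard (each step advances i by
-- ≥ 1, callers pass l.length). w.find("]", i+1) is ported as List.findIdx? on l.drop (i+1)
-- shifted back by i+1 — exact for a single-character needle, none ↔ -1; w[i:j+1] is the
-- slice (l.drop i).take (j+1-i).
def pwB_go (fuel : Nat) (l : List Char) (i : Nat) : List (List Char) :=
  match fuel with
  | 0 => []
  | fuel + 1 =>
    if i < l.length then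
      let c := l[i]!
      if c = '[' then
        match (l.drop (i + 1)).findIdx? (· = ']') with
        | none => []   -- j = -1: break
        | some k =>    -- j = i + 1 + k
            ((l.drop i).take (k + 2)) :: pwB_go fuel l (i + k + 2)
      else (if c = '_' then ([] : List Char) else [c]) :: pwB_go fuel l (i + 1)
    else []

def parse_word_str_to_list_alt (w : String) : List String :=
  (pwB_go w.toList.length w.toList 0).map String.ofList

-- ===== PRECONDITION & SPEC =====
-- Pre_ excludes exactly the inputs on which Python A raises AssertionError: a '[' occurring
-- inside an unclosed bracket group, i.e. two '[' with no ']' strictly between them.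
def Pre_parse_word_str_to_list (w : String) : Prop :=
  ∀ i < w.toList.length, ∀ j < w.toList.length,
    (i < j ∧ w.toList[i]! = '[' ∧ w.toList[j]! = '[') →
      ∃ k < j, i < k ∧ w.toList[k]! = ']'
instance (w : String) : Decidable (Pre_parse_word_str_to_list w) := by
  unfold Pre_parse_word_str_to_list; infer_instance

def pvWitness_parse_word_str_to_list : String := "ab_c[xy]d"

def Spec_parse_word_str_to_list (w : String) (out : List String) : Prop := out = parse_word_str_to_list_alt w
instance (w : String) (out : List String) : Decidable (Spec_parse_word_str_to_list w out) := by unfold Spec_parse_word_str_to_list; infer_instance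

-- ===== CLAIM (what is proved, stated in full; the proofs are below) =====
def Claim_equal_parse_word_str_to_list : Prop := ∀ (w : String), Dom_parse_word_str_to_list w → Pre_parse_word_str_to_list w → Spec_parse_word_str_to_list w (parse_word_str_to_list w)

-- ===== LEMMAS AND PROOFS =====

-- suffix form of pwB_go, used only by the proofs below (pwB_suffix in the bridge lemma)
def pwB_goS (fuel : Nat) (l : List Char) : List (List Char) :=
  match fuel, l with
  | _, [] => []
  | 0, _ :: _ => []
  | fuel + 1, c :: rest =>
    if c = '[' then
      match rest.findIdx? (· = ']') with
      | none => []
      | some j => ('[' :: rest.take (j + 1)) :: pwB_goS fuel (rest.drop (j + 1))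
    else (if c = '_' then ([] : List Char) else [c]) :: pwB_goS fuel rest

-- While inside brackets, A's fold consumes up to (and including) the first ']' into the
-- current item, flushes it, and resumes outside; with no ']' left, the pending item is dropped.
theorem pwA_inside (l : List Char) (lst : List (List Char)) (cur : List Char) :
    (List.foldl pwA_step (lst, true, cur) l).1 =
      match l.findIdx? (· = ']') with
      | none => lst
      | some j =>
          (List.foldl pwA_step (lst ++ [cur ++ l.take (j + 1)], false, ([] : List Char))
            (l.drop (j + 1))).1 := by
  induction l generalizing lst cur with
  | nil => simp
  | cons c rest ih =>
    by_cases hc : c = ']'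
    · subst hc
      simp [List.findIdx?_cons, pwA_step]
    · rw [List.foldl_cons]
      have hstep : pwA_step (lst, true, cur) c = (lst, true, cur ++ [c]) := by
        simp [pwA_step, hc]
      rw [hstep, ih]
      simp only [List.findIdx?_cons, decide_eq_true_eq, hc, if_false]
      cases hf : rest.findIdx? (· = ']') with
      | none => simp
      | some j => simp [List.take_succ_cons, List.drop_succ_cons]

-- A's fold from the outside state produces exactly B's groups, appended to the accumulator.
theorem pwA_eq_pwB (n : ℕ) : ∀ (l : List Char), l.length ≤ n → ∀ (lst : List (List Char)),
    (List.foldl pwA_step (lst, false, ([] : List Char)) l).1 = lst ++ pwB_goS n l := by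
  induction n with
  | zero =>
    intro l hl lst
    have : l = [] := List.eq_nil_of_length_eq_zero (Nat.le_zero.mp hl)
    subst this; simp [pwB_goS]
  | succ n ih =>
    intro l hl lst
    cases l with
    | nil => simp [pwB_goS]
    | cons c rest =>
      by_cases hc : c = '['
      · subst hc
        rw [List.foldl_cons]
        have hstep : pwA_step (lst, false, ([] : List Char)) '[' = (lst, true, ['[']) := by
          simp [pwA_step]
        rw [hstep, pwA_inside]
        cases hf : rest.findIdx? (· = ']') with
        | none => simp [pwB_goS, hf]
        | some j =>
          simp only
          rw [ih (rest.drop (j + 1)) (by simp at hl ⊢; omega)]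
          simp [pwB_goS, hf]
      · rw [List.foldl_cons]
        by_cases hu : c = '_'
        · subst hu
          have hstep : pwA_step (lst, false, ([] : List Char)) '_' =
              (lst ++ [([] : List Char)], false, []) := by simp [pwA_step]
          rw [hstep, ih rest (by simp at hl; omega)]
          simp [pwB_goS]
        · have hstep : pwA_step (lst, false, ([] : List Char)) c =
              (lst ++ [[c]], false, []) := by simp [pwA_step, hc, hu]
          rw [hstep, ih rest (by simp at hl; omega)]
          simp [pwB_goS, hc, hu]

-- The index-based scan equals the suffix-consuming recursion on the dropped suffix.
theorem pwB_go_eq_goS (fuel : Nat) : ∀ (l : List Char) (i : Nat),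
    pwB_go fuel l i = pwB_goS fuel (l.drop i) := by
  induction fuel with
  | zero =>
    intro l i
    cases l.drop i <;> simp [pwB_go, pwB_goS]
  | succ fuel ih =>
    intro l i
    by_cases hi : i < l.length
    · have hdrop : l.drop i = l[i] :: l.drop (i + 1) := List.drop_eq_getElem_cons hi
      have hbang : l[i]! = l[i] := getElem!_pos l i hi
      rw [pwB_go]
      simp only [hi, if_true, hbang]
      by_cases hc : l[i] = '['
      · rw [hdrop, pwB_goS]
        simp only [hc, if_true]
        cases hf : (l.drop (i + 1)).findIdx? (· = ']') with
        | none => simp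
        | some k =>
          simp only
          rw [ih l (i + k + 2)]
          have h1 : List.drop (k + 1) (List.drop (i + 1) l) = List.drop (i + k + 2) l := by
            rw [List.drop_drop]; congr 1; omega
          have h2 : List.take (k + 2) ('[' :: List.drop (i + 1) l) =
              '[' :: List.take (k + 1) (List.drop (i + 1) l) := by
            rw [show k + 2 = (k + 1) + 1 from rfl, List.take_succ_cons]
          rw [h1, h2]
      · rw [hdrop, pwB_goS]
        simp only [hc, if_false]
        rw [ih l (i + 1)]
    · have : l.drop i = [] := List.drop_eq_nil_of_le (by omega)
      rw [pwB_go, this, pwB_goS]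
      simp [hi]

-- ===== VERDICT (by name: the statement is the Claim_ definition above) =====
theorem parse_word_str_to_list_spec : Claim_equal_parse_word_str_to_list := by
  intro w _ _
  unfold Spec_parse_word_str_to_list parse_word_str_to_list parse_word_str_to_list_alt
  rw [pwB_go_eq_goS, List.drop_zero, pwA_eq_pwB w.toList.length w.toList le_rfl []]
  simp
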